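-- pv_equiv track=rewrite | github.com/Tanmayska11/ai-resume | ml/matching/feature_builder.py | _extract_jd_skills
-- ===== SOURCE A (Python) =====
-- from typing import Dict, Any, List, Set
--
-- def _extract_jd_skills(
--     jd_text: str,
--     known_skill_vocab: Set[str]
-- ) -> Set[str]:
--
--     matched = set()
--
--     for skill in known_skill_vocab:
--         skill_norm = skill.lower()
--
--         if len(skill_norm) < 3:
--             continue
--
--         if skill_norm in jd_text:
--             matched.add(skill)
--             continue
--
--         if _skill_alias_match(skill_norm, jd_text):
--             matched.add(skill)
--
--     return matched
--
-- def _skill_alias_match(skill: str, jd_text: str) -> bool: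
--     alias_map = {
--         "apache airflow": ["airflow"],
--         "aws (ec2, ecr)": ["aws", "amazon web services"],
--         "etl / elt pipelines": ["etl", "elt", "data pipelines"],
--         "git & github actions": ["git", "github", "ci cd", "cicd"],
--         "fastapi / django rest": ["fastapi", "django", "rest api"],
--         "pyspark": ["spark"],
--         "machine learning (scikit-learn)": ["machine learning", "scikit learn"],
--         "data modeling (relational)": ["data modeling", "relational modeling"],
--         "data quality & validation": ["data quality", "data validation"],
--     }
--
--     for alias in alias_map.get(skill, []):
--         if alias in jd_text:
--             return True
--
--     return False
-- ===== SOURCE B (Python) =====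
-- _ALIAS_MAP = {
--     "apache airflow": ["airflow"],
--     "aws (ec2, ecr)": ["aws", "amazon web services"],
--     "etl / elt pipelines": ["etl", "elt", "data pipelines"],
--     "git & github actions": ["git", "github", "ci cd", "cicd"],
--     "fastapi / django rest": ["fastapi", "django", "rest api"],
--     "pyspark": ["spark"],
--     "machine learning (scikit-learn)": ["machine learning", "scikit learn"],
--     "data modeling (relational)": ["data modeling", "relational modeling"],
--     "data quality & validation": ["data quality", "data validation"],
-- }
--
--
-- def _patterns(skill):
--     """All text patterns that count as an occurrence of `skill`."""
--     norm = skill.lower()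
--     if len(norm) < 3:
--         return []
--     return [norm] + _ALIAS_MAP.get(norm, [])
--
--
-- def _extract_jd_skills(jd_text, known_skill_vocab):
--     # Phase 1: the deduplicated universe of candidate patterns, built once.
--     all_pats = list(dict.fromkeys(p for s in known_skill_vocab for p in _patterns(s)))
--     # Phase 2: the occurrence set — each distinct pattern is searched for exactly once.
--     present = {p for p in all_pats if p in jd_text}
--     # Phase 3: a skill matches iff one of its patterns occurs.
--     return {s for s in known_skill_vocab if any(p in present for p in _patterns(s))}
-- ===== Notes on version B (the rewrite author's own statement) =====
-- stated objective: alternative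
-- what changed: A runs a per-skill cascade (substring test on the skill, then a helper that scans its aliases with early exit); B flattens skills+aliases into one deduplicated pattern list, computes the set of patterns occurring in the text once, and then classifies each skill by set lookups of its patterns, so the per-skill alias scan against the text disappears.
import Mathlib
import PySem

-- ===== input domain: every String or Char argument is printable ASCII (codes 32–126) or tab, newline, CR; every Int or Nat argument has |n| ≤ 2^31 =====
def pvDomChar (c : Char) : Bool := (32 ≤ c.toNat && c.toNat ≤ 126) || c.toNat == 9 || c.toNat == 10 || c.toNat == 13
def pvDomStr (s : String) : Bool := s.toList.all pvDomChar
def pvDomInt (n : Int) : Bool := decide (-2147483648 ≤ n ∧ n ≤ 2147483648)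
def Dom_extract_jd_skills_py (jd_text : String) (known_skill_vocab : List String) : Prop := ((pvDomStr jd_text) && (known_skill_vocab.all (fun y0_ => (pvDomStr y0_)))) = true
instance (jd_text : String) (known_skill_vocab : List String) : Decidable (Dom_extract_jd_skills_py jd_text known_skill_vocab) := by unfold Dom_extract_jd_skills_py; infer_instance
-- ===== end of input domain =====

-- B replaces A's per-skill cascade (skill substring test, then an alias-scan helper) by a
-- deduplicated pattern list whose occurrence set is computed once and then used to classify
-- each skill by set lookups (objective: alternative, same cost; both programs are pure).

-- ===== PORT A =====
-- the module-level alias dict (shared verbatim by both Pythons)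
def pvAliasMap : PySem.Dict String (List String) :=
  PySem.Dict.ofList [
    ("apache airflow", ["airflow"]),
    ("aws (ec2, ecr)", ["aws", "amazon web services"]),
    ("etl / elt pipelines", ["etl", "elt", "data pipelines"]),
    ("git & github actions", ["git", "github", "ci cd", "cicd"]),
    ("fastapi / django rest", ["fastapi", "django", "rest api"]),
    ("pyspark", ["spark"]),
    ("machine learning (scikit-learn)", ["machine learning", "scikit learn"]),
    ("data modeling (relational)", ["data modeling", "relational modeling"]),
    ("data quality & validation", ["data quality", "data validation"])]

-- 'for alias in …: if alias in jd_text: return True / return False' is List.any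
def skill_alias_match_py (skill : String) (jd_text : String) : Bool :=
  (PySem.Dict.getD pvAliasMap skill []).any (fun al => PySem.Str.isIn al jd_text)

def extract_jd_skills_py (jd_text : String) (known_skill_vocab : List String) : List String :=
  known_skill_vocab.foldl (fun (matched : PySem.Set String) skill =>
    let skill_norm := PySem.Str.lower skill
    if PySem.Str.len skill_norm < 3 then matched
    else if PySem.Str.isIn skill_norm jd_text then PySem.Set.add matched skill
    else if skill_alias_match_py skill_norm jd_text then PySem.Set.add matched skill
    else matched) PySem.Set.empty

-- ===== PORT B =====
def patterns_b (skill : String) : List String :=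
  let norm := PySem.Str.lower skill
  if PySem.Str.len norm < 3 then []
  else norm :: PySem.Dict.getD pvAliasMap norm []

def extract_jd_skills_py_alt (jd_text : String) (known_skill_vocab : List String) : List String :=
  let all_pats := PySem.List.dedup (known_skill_vocab.flatMap (fun s => patterns_b s))
  let present : PySem.Set String :=
    PySem.Set.ofList (all_pats.filter (fun p => PySem.Str.isIn p jd_text))
  PySem.Set.ofList (known_skill_vocab.filter
    (fun s => (patterns_b s).any (fun p => PySem.Set.contains present p)))

-- ===== PRECONDITION & SPEC =====
def Spec_extract_jd_skills_py (jd_text : String) (known_skill_vocab : List String) (out : List String) : Prop := out = extract_jd_skills_py_alt jd_text known_skill_vocab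
instance (jd_text : String) (known_skill_vocab : List String) (out : List String) : Decidable (Spec_extract_jd_skills_py jd_text known_skill_vocab out) := by unfold Spec_extract_jd_skills_py; infer_instance

-- ===== CLAIM (what is proved, stated in full; the proofs are below) =====
def Claim_equal_extract_jd_skills_py : Prop := ∀ (jd_text : String) (known_skill_vocab : List String), Dom_extract_jd_skills_py jd_text known_skill_vocab → Spec_extract_jd_skills_py jd_text known_skill_vocab (extract_jd_skills_py jd_text known_skill_vocab)

-- ===== LEMMAS AND PROOFS =====

-- the per-skill matching condition both programs decide
def pvPredA (jd_text skill : String) : Bool :=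
  let norm := PySem.Str.lower skill
  if PySem.Str.len norm < 3 then false
  else PySem.Str.isIn norm jd_text || skill_alias_match_py norm jd_text

lemma pv_foldA (jd_text : String) (vocab : List String) (init : PySem.Set String) :
    vocab.foldl (fun (matched : PySem.Set String) skill =>
      let skill_norm := PySem.Str.lower skill
      if PySem.Str.len skill_norm < 3 then matched
      else if PySem.Str.isIn skill_norm jd_text then PySem.Set.add matched skill
      else if skill_alias_match_py skill_norm jd_text then PySem.Set.add matched skill
      else matched) init
    = (vocab.filter (fun s => pvPredA jd_text s)).foldl PySem.Set.add init := by
  induction vocab generalizing init with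
  | nil => rfl
  | cons s t ih =>
    simp only [List.foldl_cons, List.filter_cons, pvPredA]
    simp only [pvPredA] at ih
    simp at ih ⊢
    by_cases h1 : (PySem.Chars.lower s.toList).length < 3
    · have h1' : ¬ 3 ≤ (PySem.Chars.lower s.toList).length := by omega
      simp [h1, h1']
      exact ih init
    · have h1' : 3 ≤ (PySem.Chars.lower s.toList).length := by omega
      by_cases h2 : PySem.Chars.isIn (PySem.Chars.lower s.toList) jd_text.toList = true
      · simp [h1, h1', h2]
        exact ih (PySem.Set.add init s)
      · by_cases h3 : skill_alias_match_py (PySem.Str.lower s) jd_text = true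
        · simp [h1, h1', h2, h3]
          exact ih (PySem.Set.add init s)
        · simp [h1, h1', h2, h3]
          exact ih init

lemma pv_A_eq (jd_text : String) (vocab : List String) :
    extract_jd_skills_py jd_text vocab
      = PySem.Set.ofList (vocab.filter (fun s => pvPredA jd_text s)) := by
  unfold extract_jd_skills_py
  rw [pv_foldA, PySem.Set.ofList_eq_foldl]
  rfl

lemma pv_B_eq (jd_text : String) (vocab : List String) :
    extract_jd_skills_py_alt jd_text vocab
      = PySem.Set.ofList (vocab.filter (fun s => pvPredA jd_text s)) := by
  show PySem.Set.ofList (vocab.filter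
      (fun s => (patterns_b s).any (fun p =>
        PySem.Set.contains
          (PySem.Set.ofList ((PySem.List.dedup (vocab.flatMap (fun s => patterns_b s))).filter
            (fun p => PySem.Str.isIn p jd_text))) p)))
    = PySem.Set.ofList (vocab.filter (fun s => pvPredA jd_text s))
  refine congrArg PySem.Set.ofList (List.filter_congr ?_)
  intro s hs
  have hcont : ∀ p ∈ patterns_b s,
      PySem.Set.contains
        (PySem.Set.ofList ((PySem.List.dedup (vocab.flatMap (fun s => patterns_b s))).filter
          (fun p => PySem.Str.isIn p jd_text))) p = PySem.Str.isIn p jd_text := by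
    intro p hp
    have hall : p ∈ PySem.List.dedup (vocab.flatMap (fun s => patterns_b s)) :=
      (PySem.List.mem_dedup _ _).mpr (List.mem_flatMap.mpr ⟨s, hs, hp⟩)
    apply Bool.coe_iff_coe.mp
    rw [PySem.Set.contains, List.contains_iff_mem, PySem.Set.mem_ofList, List.mem_filter]
    exact ⟨fun h => h.2, fun h => ⟨hall, h⟩⟩
  rw [PySem.List.any_congr_mem hcont]
  by_cases h : (PySem.Chars.lower s.toList).length < 3
  · simp [patterns_b, pvPredA, h]
  · simp [patterns_b, pvPredA, h, skill_alias_match_py]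

-- ===== VERDICT (by name: the statement is the Claim_ definition above) =====
theorem extract_jd_skills_py_spec : Claim_equal_extract_jd_skills_py := by
  intro jd_text vocab _
  unfold Spec_extract_jd_skills_py
  rw [pv_A_eq, pv_B_eq]
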